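-- pv_equiv track=rewrite | github.com/persistforever/yolo-tensorflow | exps/table-v4/pretreat-v1.py | _is_cell
-- ===== SOURCE A (Python) =====
-- def _is_cell(lt, rt, lb, rb, lines):
-- 	thresh = 5
-- 	rect_lines = []
-- 	rect_lines.append([lt[0], lb[0], lt[1], lb[1]])
-- 	rect_lines.append([lt[0], rt[0], lt[1], rt[1]])
-- 	rect_lines.append([rt[0], rb[0], rt[1], rb[1]])
-- 	rect_lines.append([lb[0], rb[0], lb[1], rb[1]])
-- 	for line1 in rect_lines:
-- 		is_intersect = False
-- 		for l in lines:
-- 			line2 = l['position']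
-- 			if (line1[0] == line1[1] and line2[0] == line2[1]):
-- 				if line1[2] >= (line2[2] - thresh) and line1[3] <= (line2[3] + thresh):
-- 					is_intersect = True
-- 					break
-- 			elif (line1[2] == line1[3] and line2[2] == line2[3]):
-- 				if line1[0] >= (line2[0] - thresh) and line1[1] <= (line2[1] + thresh):
-- 					is_intersect = True
-- 					break
-- 		if not is_intersect:
-- 			return False
-- 	return True
-- ===== SOURCE B (Python) =====
-- def _is_cell(lt, rt, lb, rb, lines):
-- 	thresh = 5
-- 	e1 = (lt[0], lb[0], lt[1], lb[1])
-- 	e2 = (lt[0], rt[0], lt[1], rt[1])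
-- 	e3 = (rt[0], rb[0], rt[1], rb[1])
-- 	e4 = (lb[0], rb[0], lb[1], rb[1])
-- 	def covers(p, e):
-- 		if e[0] == e[1] and p[0] == p[1]:
-- 			return e[2] >= p[2] - thresh and e[3] <= p[3] + thresh
-- 		if e[2] == e[3] and p[2] == p[3]:
-- 			return e[0] >= p[0] - thresh and e[1] <= p[1] + thresh
-- 		return False
-- 	# single pass over `lines`: accumulate which edges are already covered,
-- 	# stop as soon as all four are; malformed lines are skipped
-- 	c1 = c2 = c3 = c4 = False
-- 	for l in lines:
-- 		if c1 and c2 and c3 and c4: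
-- 			break
-- 		p = l.get('position')
-- 		if p is None or len(p) < 4:
-- 			continue
-- 		c1 = c1 or covers(p, e1)
-- 		c2 = c2 or covers(p, e2)
-- 		c3 = c3 or covers(p, e3)
-- 		c4 = c4 or covers(p, e4)
-- 	return c1 and c2 and c3 and c4
-- ===== Notes on version B (the rewrite author's own statement) =====
-- stated objective: alternative
-- what changed: Loop interchange: A scans all of `lines` once per rectangle edge (four staged scans with early return per edge); B makes a SINGLE pass over `lines`, maintaining an accumulator of four per-edge coverage flags updated by each line, breaking early once all four edges are covered, and skipping malformed lines.
-- outside the precondition, e.g. on _is_cell((0, 0), (1, 0), (0, 1), (1, 1), [{'position': [0, 1]}]): A returns False, B returns False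
import Mathlib
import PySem

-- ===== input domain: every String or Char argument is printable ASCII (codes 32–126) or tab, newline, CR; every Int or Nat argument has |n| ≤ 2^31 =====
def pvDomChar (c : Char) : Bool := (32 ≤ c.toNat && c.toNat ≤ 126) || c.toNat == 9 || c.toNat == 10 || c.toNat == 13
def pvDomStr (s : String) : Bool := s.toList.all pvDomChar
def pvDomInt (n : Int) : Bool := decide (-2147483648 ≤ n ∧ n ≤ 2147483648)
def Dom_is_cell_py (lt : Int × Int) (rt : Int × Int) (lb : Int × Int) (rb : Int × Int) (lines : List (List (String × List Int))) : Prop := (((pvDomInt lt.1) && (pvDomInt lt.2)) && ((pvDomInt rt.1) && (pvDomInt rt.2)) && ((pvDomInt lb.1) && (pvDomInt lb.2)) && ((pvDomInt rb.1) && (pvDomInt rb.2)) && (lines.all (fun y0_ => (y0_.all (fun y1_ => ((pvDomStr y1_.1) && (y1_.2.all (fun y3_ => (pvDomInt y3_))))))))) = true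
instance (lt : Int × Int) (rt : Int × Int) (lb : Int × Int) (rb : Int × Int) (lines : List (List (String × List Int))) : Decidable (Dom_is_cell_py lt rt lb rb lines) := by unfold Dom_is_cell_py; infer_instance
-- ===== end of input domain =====

-- B interchanges A's loops: instead of four staged scans of `lines` (one per rectangle
-- edge), B makes one pass over `lines` accumulating four per-edge coverage flags with an
-- early break, skipping malformed lines; equivalence is proved on a closed-form safe region
-- (elsewhere Python A's lazy, break-dependent indexing may raise).
-- ===== PORT A =====
-- shared accessor: l['position'] (missing key -> []) and p[i] (out of range -> 0);
-- exact inside Pre_is_cell_py, where neither Python indexes out of range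
def pvPos (l : List (String × List Int)) : List Int :=
  ((PySem.Dict.mk l).get? "position").getD []

def pvIx (p : List Int) (i : Int) : Int :=
  (PySem.List.pyGet? p i).getD 0

-- the inner `for l in lines` loop of A for one rect line e = (e0,e1,e2,e3)
def pvScanA (e : Int × Int × Int × Int) (lines : List (List (String × List Int))) : Bool :=
  match lines with
  | [] => false
  | l :: rest =>
    let p := pvPos l
    if e.1 = e.2.1 ∧ pvIx p 0 = pvIx p 1 then
      if e.2.2.1 ≥ pvIx p 2 - 5 ∧ e.2.2.2 ≤ pvIx p 3 + 5 then true
      else pvScanA e rest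
    else if e.2.2.1 = e.2.2.2 ∧ pvIx p 2 = pvIx p 3 then
      if e.1 ≥ pvIx p 0 - 5 ∧ e.2.1 ≤ pvIx p 1 + 5 then true
      else pvScanA e rest
    else pvScanA e rest

def is_cell_py (lt : Int × Int) (rt : Int × Int) (lb : Int × Int) (rb : Int × Int) (lines : List (List (String × List Int))) : Bool :=
  pvScanA (lt.1, lb.1, lt.2, lb.2) lines &&
  pvScanA (lt.1, rt.1, lt.2, rt.2) lines &&
  pvScanA (rt.1, rb.1, rt.2, rb.2) lines &&
  pvScanA (lb.1, rb.1, lb.2, rb.2) lines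

-- ===== PORT B =====
-- Source B's covers(p, e)
def pvCovers (p : List Int) (e : Int × Int × Int × Int) : Bool :=
  if e.1 = e.2.1 ∧ pvIx p 0 = pvIx p 1 then
    decide (e.2.2.1 ≥ pvIx p 2 - 5 ∧ e.2.2.2 ≤ pvIx p 3 + 5)
  else if e.2.2.1 = e.2.2.2 ∧ pvIx p 2 = pvIx p 3 then
    decide (e.1 ≥ pvIx p 0 - 5 ∧ e.2.1 ≤ pvIx p 1 + 5)
  else false

-- Source B's single `for l in lines` loop over the flag accumulator (c1,c2,c3,c4)
def pvLoopB (e1 e2 e3 e4 : Int × Int × Int × Int)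
    (c : Bool × Bool × Bool × Bool) (lines : List (List (String × List Int))) :
    Bool × Bool × Bool × Bool :=
  match lines with
  | [] => c
  | l :: rest =>
    if c.1 && c.2.1 && c.2.2.1 && c.2.2.2 then c
    else
      match (PySem.Dict.mk l).get? "position" with
      | none => pvLoopB e1 e2 e3 e4 c rest
      | some p =>
        if p.length < 4 then pvLoopB e1 e2 e3 e4 c rest
        else pvLoopB e1 e2 e3 e4
          (c.1 || pvCovers p e1, c.2.1 || pvCovers p e2,
           c.2.2.1 || pvCovers p e3, c.2.2.2 || pvCovers p e4) rest

def is_cell_py_alt (lt : Int × Int) (rt : Int × Int) (lb : Int × Int) (rb : Int × Int) (lines : List (List (String × List Int))) : Bool :=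
  let c := pvLoopB (lt.1, lb.1, lt.2, lb.2) (lt.1, rt.1, lt.2, rt.2)
    (rt.1, rb.1, rt.2, rb.2) (lb.1, rb.1, lb.2, rb.2) (false, false, false, false) lines
  c.1 && c.2.1 && c.2.2.1 && c.2.2.2

-- ===== PRECONDITION & SPEC =====
-- some rectangle edge is horizontal (its two y coordinates coincide)
def pvH (lt rt lb rb : Int × Int) : Prop :=
  lt.2 = lb.2 ∨ lt.2 = rt.2 ∨ rt.2 = rb.2 ∨ lb.2 = rb.2

-- Pre_ excludes inputs with malformed lines (no 'position' key, or fewer than 4 coordinates)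
-- except those A provably never indexes past: whether Python A raises on a malformed line
-- depends on its lazy, break-dependent scan order, which has no closed form, so Pre_
-- conservatively admits a short line only when (a) the first edge is neither vertical nor
-- horizontal (A then returns False reading only the keys), or (b) the line is a non-vertical
-- pair and no edge is horizontal (no executed branch ever reads its missing coordinates).
def Pre_is_cell_py (lt : Int × Int) (rt : Int × Int) (lb : Int × Int) (rb : Int × Int) (lines : List (List (String × List Int))) : Prop :=
  (∀ l ∈ lines, ((PySem.Dict.mk l).get? "position").isSome = true) ∧
    ((lt.1 ≠ lb.1 ∧ lt.2 ≠ lb.2) ∨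
      ∀ l ∈ lines, 4 ≤ (pvPos l).length ∨
        (2 ≤ (pvPos l).length ∧ pvIx (pvPos l) 0 ≠ pvIx (pvPos l) 1 ∧ ¬ pvH lt rt lb rb))
instance (lt : Int × Int) (rt : Int × Int) (lb : Int × Int) (rb : Int × Int) (lines : List (List (String × List Int))) : Decidable (Pre_is_cell_py lt rt lb rb lines) := by unfold Pre_is_cell_py pvH; infer_instance

def pvWitness_is_cell_py : (Int × Int) × (Int × Int) × (Int × Int) × (Int × Int) × (List (List (String × List Int))) :=
  ((0, 0), (2, 0), (0, 2), (2, 2), [[("position", [0, 0, -1, 3])]])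

def Spec_is_cell_py (lt : Int × Int) (rt : Int × Int) (lb : Int × Int) (rb : Int × Int) (lines : List (List (String × List Int))) (out : Bool) : Prop := out = is_cell_py_alt lt rt lb rb lines
instance (lt : Int × Int) (rt : Int × Int) (lb : Int × Int) (rb : Int × Int) (lines : List (List (String × List Int))) (out : Bool) : Decidable (Spec_is_cell_py lt rt lb rb lines out) := by unfold Spec_is_cell_py; infer_instance

-- ===== CLAIM (what is proved, stated in full; the proofs are below) =====
def Claim_equal_is_cell_py : Prop := ∀ (lt : Int × Int) (rt : Int × Int) (lb : Int × Int) (rb : Int × Int) (lines : List (List (String × List Int))), Dom_is_cell_py lt rt lb rb lines → Pre_is_cell_py lt rt lb rb lines → Spec_is_cell_py lt rt lb rb lines (is_cell_py lt rt lb rb lines)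

-- ===== LEMMAS AND PROOFS =====
-- A's per-line if/elif test, as a single predicate
def pvMatchA (e : Int × Int × Int × Int) (p : List Int) : Bool :=
  if e.1 = e.2.1 ∧ pvIx p 0 = pvIx p 1 then
    decide (e.2.2.1 ≥ pvIx p 2 - 5 ∧ e.2.2.2 ≤ pvIx p 3 + 5)
  else if e.2.2.1 = e.2.2.2 ∧ pvIx p 2 = pvIx p 3 then
    decide (e.1 ≥ pvIx p 0 - 5 ∧ e.2.1 ≤ pvIx p 1 + 5)
  else false

theorem pvScanA_eq_any (e : Int × Int × Int × Int) (lines : List (List (String × List Int))) :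
    pvScanA e lines = lines.any (fun l => pvMatchA e (pvPos l)) := by
  induction lines with
  | nil => simp [pvScanA]
  | cons l rest ih =>
    simp only [pvScanA, List.any_cons, ih, pvMatchA]
    by_cases h1 : e.1 = e.2.1 ∧ pvIx (pvPos l) 0 = pvIx (pvPos l) 1
    · rw [if_pos h1, if_pos h1]
      by_cases hc : e.2.2.1 ≥ pvIx (pvPos l) 2 - 5 ∧ e.2.2.2 ≤ pvIx (pvPos l) 3 + 5
      · rw [if_pos hc, decide_eq_true hc, Bool.true_or]
      · rw [if_neg hc, decide_eq_false hc, Bool.false_or]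
    · rw [if_neg h1, if_neg h1]
      by_cases h2 : e.2.2.1 = e.2.2.2 ∧ pvIx (pvPos l) 2 = pvIx (pvPos l) 3
      · rw [if_pos h2, if_pos h2]
        by_cases hc : e.1 ≥ pvIx (pvPos l) 0 - 5 ∧ e.2.1 ≤ pvIx (pvPos l) 1 + 5
        · rw [if_pos hc, decide_eq_true hc, Bool.true_or]
        · rw [if_neg hc, decide_eq_false hc, Bool.false_or]
      · rw [if_neg h2, if_neg h2, Bool.false_or]

-- the well-formed positions B's pass actually processes, in order
def pvGoodPos (lines : List (List (String × List Int))) : List (List Int) :=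
  lines.filterMap (fun l =>
    match (PySem.Dict.mk l).get? "position" with
    | none => none
    | some p => if p.length < 4 then none else some p)

theorem pvGoodPos_cons_none (l : List (String × List Int)) (rest : List (List (String × List Int)))
    (hp : (PySem.Dict.mk l).get? "position" = none) : pvGoodPos (l :: rest) = pvGoodPos rest := by
  simp [pvGoodPos, hp]

theorem pvGoodPos_cons_short (l : List (String × List Int)) (rest : List (List (String × List Int)))
    (p : List Int) (hp : (PySem.Dict.mk l).get? "position" = some p) (hl : p.length < 4) :
    pvGoodPos (l :: rest) = pvGoodPos rest := by
  simp [pvGoodPos, hp, hl]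

theorem pvGoodPos_cons_good (l : List (String × List Int)) (rest : List (List (String × List Int)))
    (p : List Int) (hp : (PySem.Dict.mk l).get? "position" = some p) (hl : ¬ p.length < 4) :
    pvGoodPos (l :: rest) = p :: pvGoodPos rest := by
  simp [pvGoodPos, hp, hl]

-- B's loop, componentwise: each final flag = initial flag OR some good line covers the edge
theorem pvLoopB_eq (e1 e2 e3 e4 : Int × Int × Int × Int)
    (c : Bool × Bool × Bool × Bool) (lines : List (List (String × List Int))) :
    pvLoopB e1 e2 e3 e4 c lines =
      (c.1 || (pvGoodPos lines).any (fun p => pvCovers p e1),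
       c.2.1 || (pvGoodPos lines).any (fun p => pvCovers p e2),
       c.2.2.1 || (pvGoodPos lines).any (fun p => pvCovers p e3),
       c.2.2.2 || (pvGoodPos lines).any (fun p => pvCovers p e4)) := by
  induction lines generalizing c with
  | nil => simp [pvLoopB, pvGoodPos]
  | cons l rest ih =>
    obtain ⟨a, b2, b3, b4⟩ := c
    simp only [pvLoopB]
    by_cases hb : (a && b2 && b3 && b4) = true
    · rw [if_pos hb]
      simp only [Bool.and_eq_true] at hb
      obtain ⟨⟨⟨h1, h2⟩, h3⟩, h4⟩ := hb
      simp [h1, h2, h3, h4]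
    · rw [if_neg hb]
      cases hp : (PySem.Dict.mk l).get? "position" with
      | none => rw [ih, pvGoodPos_cons_none l rest hp]
      | some p =>
        dsimp only
        by_cases hl : p.length < 4
        · rw [if_pos hl, ih, pvGoodPos_cons_short l rest p hp hl]
        · rw [if_neg hl, ih, pvGoodPos_cons_good l rest p hp hl]
          simp [Bool.or_assoc]

-- on a line B processes (length ≥ 4), A's test and B's covers coincide (they are the
-- same predicate); pvMatchA and pvCovers are definitionally equal up to argument order
theorem pvMatchA_eq_covers (e : Int × Int × Int × Int) (p : List Int) :
    pvMatchA e p = pvCovers p e := rfl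

-- A's scan over all lines = B's any over the good positions, given that every malformed
-- line (missing coordinates) is a non-vertical pair and this edge is not horizontal
theorem pvScanA_eq_good (e : Int × Int × Int × Int) (lines : List (List (String × List Int)))
    (hk : ∀ l ∈ lines, ((PySem.Dict.mk l).get? "position").isSome = true)
    (hs : ∀ l ∈ lines, 4 ≤ (pvPos l).length ∨
      (pvIx (pvPos l) 0 ≠ pvIx (pvPos l) 1 ∧ e.2.2.1 ≠ e.2.2.2)) :
    pvScanA e lines = (pvGoodPos lines).any (fun p => pvCovers p e) := by
  rw [pvScanA_eq_any]
  induction lines with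
  | nil => rfl
  | cons l rest ih =>
    have hk' := hk l (by simp)
    cases hp : (PySem.Dict.mk l).get? "position" with
    | none => rw [hp] at hk'; simp at hk'
    | some p =>
      have hpos : pvPos l = p := by simp [pvPos, hp]
      have ihr := ih (fun x hx => hk x (by simp [hx])) (fun x hx => hs x (by simp [hx]))
      by_cases hl : p.length < 4
      · have hm : pvMatchA e (pvPos l) = false := by
          rcases hs l (by simp) with hg | ⟨h01, h23⟩
          · rw [hpos] at hg; omega
          · simp [pvMatchA, h01, h23]
        rw [List.any_cons, hm, Bool.false_or, ihr, pvGoodPos_cons_short l rest p hp hl]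
      · rw [List.any_cons, ihr, pvGoodPos_cons_good l rest p hp hl, List.any_cons,
          hpos, pvMatchA_eq_covers]

-- an edge that is neither vertical nor horizontal matches no line at all, in A or in B
theorem pvScanA_false (e : Int × Int × Int × Int) (lines : List (List (String × List Int)))
    (h01 : e.1 ≠ e.2.1) (h23 : e.2.2.1 ≠ e.2.2.2) : pvScanA e lines = false := by
  rw [pvScanA_eq_any]
  simp [pvMatchA, h01, h23]

theorem pvCovers_false (e : Int × Int × Int × Int) (p : List Int)
    (h01 : e.1 ≠ e.2.1) (h23 : e.2.2.1 ≠ e.2.2.2) : pvCovers p e = false := by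
  simp [pvCovers, h01, h23]

-- ===== VERDICT (by name: the statement is the Claim_ definition above) =====
theorem is_cell_py_spec : Claim_equal_is_cell_py := by
  intro lt rt lb rb lines _ hPre
  unfold Spec_is_cell_py is_cell_py is_cell_py_alt
  rw [pvLoopB_eq]
  rcases hPre with ⟨hk, hedge1 | hPre⟩
  · rw [pvScanA_false _ _ hedge1.1 hedge1.2]
    have h0 : ((pvGoodPos lines).any fun p => pvCovers p (lt.1, lb.1, lt.2, lb.2)) = false :=
      List.any_eq_false.mpr fun p _ => by
        simp [pvCovers_false (lt.1, lb.1, lt.2, lb.2) p hedge1.1 hedge1.2]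
    simp [h0]
  · have hs : ∀ (e : Int × Int × Int × Int), (e.2.2.1 = e.2.2.2 → pvH lt rt lb rb) →
        ∀ l ∈ lines, 4 ≤ (pvPos l).length ∨
          (pvIx (pvPos l) 0 ≠ pvIx (pvPos l) 1 ∧ e.2.2.1 ≠ e.2.2.2) := by
      intro e hH l hl
      rcases hPre l hl with hg | ⟨-, hne, hnH⟩
      · exact Or.inl hg
      · exact Or.inr ⟨hne, fun h => hnH (hH h)⟩
    rw [pvScanA_eq_good _ _ hk (hs (lt.1, lb.1, lt.2, lb.2) (fun h => Or.inl h)),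
        pvScanA_eq_good _ _ hk (hs (lt.1, rt.1, lt.2, rt.2) (fun h => Or.inr (Or.inl h))),
        pvScanA_eq_good _ _ hk (hs (rt.1, rb.1, rt.2, rb.2) (fun h => Or.inr (Or.inr (Or.inl h)))),
        pvScanA_eq_good _ _ hk (hs (lb.1, rb.1, lb.2, rb.2) (fun h => Or.inr (Or.inr (Or.inr h))))]
    simp
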